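-- pv_equiv track=rewrite | github.com/shahuldxb/TradeFinance_RBAC | Python/routes/TBML.py | build_db_matches
-- ===== SOURCE A (Python) =====
-- def build_db_matches(flags):
--     matches = {
--         "entities": [],
--         "goods": [],
--         "countries": []
--     }
--
--     for f in flags:
--         entry = {
--             "rule": f.get("RuleName"),
--             "risk": f.get("RiskLevel"),
--             "reason": f.get("Reason"),
--             "explanation": f.get("Explanation"),
--             "matched": f.get("MatchedValue"),
--             "source": f.get("Source"),
--             "score": f.get("Score"),
--             "technique": f.get("Technique")
--         }
--
--         if f.get("FlagType") == "ENTITY":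
--             matches["entities"].append(entry)
--         elif f.get("FlagType") == "GOODS":
--             matches["goods"].append(entry)
--         elif f.get("FlagType") == "COUNTRY":
--             matches["countries"].append(entry)
--
--     return matches
-- ===== SOURCE B (Python) =====
-- ENTRY_KEYS = [("rule", "RuleName"), ("risk", "RiskLevel"), ("reason", "Reason"),
--               ("explanation", "Explanation"), ("matched", "MatchedValue"),
--               ("source", "Source"), ("score", "Score"), ("technique", "Technique")]
--
-- def build_db_matches(flags):
--     def entry(f):
--         return {name: f.get(k) for name, k in ENTRY_KEYS}
--     return {
--         name: [entry(f) for f in flags if f.get("FlagType") == ftype]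
--         for name, ftype in (("entities", "ENTITY"),
--                             ("goods", "GOODS"),
--                             ("countries", "COUNTRY"))
--     }
-- ===== Notes on version B (the rewrite author's own statement) =====
-- stated objective: idiomatic
-- what changed: Replaces the single branching accumulation pass with a dict comprehension whose three category lists are built by three independent filtered scans over flags, each filtering on FlagType.
import Mathlib
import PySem

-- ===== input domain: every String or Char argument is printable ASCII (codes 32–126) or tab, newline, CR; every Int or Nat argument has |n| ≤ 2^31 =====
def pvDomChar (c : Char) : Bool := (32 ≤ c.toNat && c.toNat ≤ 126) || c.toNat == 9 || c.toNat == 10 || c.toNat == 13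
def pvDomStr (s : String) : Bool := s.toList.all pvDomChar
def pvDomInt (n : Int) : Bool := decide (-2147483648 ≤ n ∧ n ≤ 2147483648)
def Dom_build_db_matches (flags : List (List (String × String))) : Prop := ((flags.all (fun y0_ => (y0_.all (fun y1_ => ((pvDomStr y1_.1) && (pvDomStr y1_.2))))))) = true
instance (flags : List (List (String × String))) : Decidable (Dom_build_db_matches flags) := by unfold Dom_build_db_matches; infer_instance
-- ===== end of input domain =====

-- B groups flags into the three categories by three independent filtered scans (one per FlagType)
-- instead of A's single branching accumulation pass; return values agree on Pre_ (all entry keys present).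

-- ===== PORT A =====
-- entry = {"rule": f.get("RuleName"), …}; under Pre_ every key is present, so Python's
-- f.get(k) (None when missing, unrepresentable as String) is exactly getD … "" there.
def pvEntryA (f : List (String × String)) : List (String × String) :=
  [("rule",        PySem.Dict.getD ⟨f⟩ "RuleName" ""),
   ("risk",        PySem.Dict.getD ⟨f⟩ "RiskLevel" ""),
   ("reason",      PySem.Dict.getD ⟨f⟩ "Reason" ""),
   ("explanation", PySem.Dict.getD ⟨f⟩ "Explanation" ""),
   ("matched",     PySem.Dict.getD ⟨f⟩ "MatchedValue" ""),
   ("source",      PySem.Dict.getD ⟨f⟩ "Source" ""),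
   ("score",       PySem.Dict.getD ⟨f⟩ "Score" ""),
   ("technique",   PySem.Dict.getD ⟨f⟩ "Technique" "")]

-- the 'matches' dict has the three fixed keys; carried as the triple of its value lists
def build_db_matches (flags : List (List (String × String))) : List (String × List (List (String × String))) :=
  let m := flags.foldl
    (fun (m : List (List (String × String)) × List (List (String × String)) × List (List (String × String))) f =>
      let entry := pvEntryA f
      if PySem.Dict.get? ⟨f⟩ "FlagType" == some "ENTITY" then (m.1 ++ [entry], m.2.1, m.2.2)
      else if PySem.Dict.get? ⟨f⟩ "FlagType" == some "GOODS" then (m.1, m.2.1 ++ [entry], m.2.2)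
      else if PySem.Dict.get? ⟨f⟩ "FlagType" == some "COUNTRY" then (m.1, m.2.1, m.2.2 ++ [entry])
      else m)
    ([], [], [])
  [("entities", m.1), ("goods", m.2.1), ("countries", m.2.2)]

-- ===== PORT B =====
def pvEntryKeys : List (String × String) :=
  [("rule", "RuleName"), ("risk", "RiskLevel"), ("reason", "Reason"),
   ("explanation", "Explanation"), ("matched", "MatchedValue"),
   ("source", "Source"), ("score", "Score"), ("technique", "Technique")]

def pvEntryB (f : List (String × String)) : List (String × String) :=
  pvEntryKeys.map (fun p => (p.1, PySem.Dict.getD ⟨f⟩ p.2 ""))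

def build_db_matches_alt (flags : List (List (String × String))) : List (String × List (List (String × String))) :=
  [("entities",  (flags.filter (fun f => PySem.Dict.get? ⟨f⟩ "FlagType" == some "ENTITY")).map pvEntryB),
   ("goods",     (flags.filter (fun f => PySem.Dict.get? ⟨f⟩ "FlagType" == some "GOODS")).map pvEntryB),
   ("countries", (flags.filter (fun f => PySem.Dict.get? ⟨f⟩ "FlagType" == some "COUNTRY")).map pvEntryB)]

-- ===== PRECONDITION & SPEC =====
-- Pre_ excludes inputs with a categorized flag (FlagType one of ENTITY/GOODS/COUNTRY) missing one of the
-- eight entry keys: there Python's f.get(k) is None in the returned entry, not a String of the declared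
-- return type (both A and B still agree there in Python). Uncategorized flags are dropped and unconstrained.
def Pre_build_db_matches (flags : List (List (String × String))) : Prop :=
  ∀ f ∈ flags,
    (PySem.Dict.get? ⟨f⟩ "FlagType" = some "ENTITY" ∨ PySem.Dict.get? ⟨f⟩ "FlagType" = some "GOODS" ∨
     PySem.Dict.get? ⟨f⟩ "FlagType" = some "COUNTRY") →
    ∀ k ∈ ["RuleName", "RiskLevel", "Reason", "Explanation", "MatchedValue", "Source", "Score", "Technique"],
      (PySem.Dict.contains ⟨f⟩ k) = true
instance (flags : List (List (String × String))) : Decidable (Pre_build_db_matches flags) := by unfold Pre_build_db_matches; infer_instance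

def pvWitness_build_db_matches : (List (List (String × String))) :=
  [[("FlagType", "ENTITY"), ("RuleName", "r1"), ("RiskLevel", "HIGH"), ("Reason", "x"),
    ("Explanation", "e"), ("MatchedValue", "m"), ("Source", "s"), ("Score", "9"), ("Technique", "t")]]

def Spec_build_db_matches (flags : List (List (String × String))) (out : List (String × List (List (String × String)))) : Prop := out = build_db_matches_alt flags
instance (flags : List (List (String × String))) (out : List (String × List (List (String × String)))) : Decidable (Spec_build_db_matches flags out) := by unfold Spec_build_db_matches; infer_instance

-- ===== CLAIM (what is proved, stated in full; the proofs are below) =====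
def Claim_equal_build_db_matches : Prop := ∀ (flags : List (List (String × String))), Dom_build_db_matches flags → Pre_build_db_matches flags → Spec_build_db_matches flags (build_db_matches flags)

-- ===== LEMMAS AND PROOFS =====

-- loop invariant: A's fold, started from any accumulator triple, appends exactly B's three filtered scans
theorem pv_fold_eq (flags : List (List (String × String)))
    (es gs cs : List (List (String × String))) :
    flags.foldl
      (fun (m : List (List (String × String)) × List (List (String × String)) × List (List (String × String))) f =>
        let entry := pvEntryA f
        if PySem.Dict.get? ⟨f⟩ "FlagType" == some "ENTITY" then (m.1 ++ [entry], m.2.1, m.2.2)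
        else if PySem.Dict.get? ⟨f⟩ "FlagType" == some "GOODS" then (m.1, m.2.1 ++ [entry], m.2.2)
        else if PySem.Dict.get? ⟨f⟩ "FlagType" == some "COUNTRY" then (m.1, m.2.1, m.2.2 ++ [entry])
        else m)
      (es, gs, cs)
    = (es ++ (flags.filter (fun f => PySem.Dict.get? ⟨f⟩ "FlagType" == some "ENTITY")).map pvEntryB,
       gs ++ (flags.filter (fun f => PySem.Dict.get? ⟨f⟩ "FlagType" == some "GOODS")).map pvEntryB,
       cs ++ (flags.filter (fun f => PySem.Dict.get? ⟨f⟩ "FlagType" == some "COUNTRY")).map pvEntryB) := by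
  induction flags generalizing es gs cs with
  | nil => simp
  | cons f rest ih =>
    simp only [List.foldl_cons, List.filter_cons]
    split_ifs with h1 h2 h3 <;>
      simp_all [pvEntryA, pvEntryB, pvEntryKeys, List.append_assoc]

-- ===== VERDICT (by name: the statement is the Claim_ definition above) =====
theorem build_db_matches_spec : Claim_equal_build_db_matches := by
  intro flags _ _
  simp only [Spec_build_db_matches, build_db_matches, build_db_matches_alt, pv_fold_eq]
  simp
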